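-- pv_equiv track=rewrite | github.com/mohitsshah/documents-caf | Information-Extraction/QANet/eval.py | format_passage
-- ===== SOURCE A (Python) =====
-- def format_passage(passage):
--     new_passage = ""
--     for idx, chr in enumerate(passage):
--         if idx > 0:
--             if chr == "\n":
--                 if passage[idx - 1] != "\n" and not passage[idx - 1].endswith("."):
--                     new_passage += "."
--         new_passage += chr
--     return new_passage
-- ===== SOURCE B (Python) =====
-- def format_passage(passage):
--     # Split into lines, close every non-final line that is non-empty and not
--     # already period-terminated, and join back with newlines.
--     lines = passage.split('\n')
--     fixed = [ln if ln == '' or ln.endswith('.') else ln + '.' for ln in lines[:-1]]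
--     return '\n'.join(fixed + lines[-1:])
-- ===== Notes on version B (the rewrite author's own statement) =====
-- stated objective: faster
-- what changed: Replaces the indexed character loop with passage[idx-1] lookback and quadratic string += accumulation by a three-stage line pipeline: split on newlines, append '.' to each non-final line that is non-empty and not already period-terminated, join back with newline (linear split/join instead of repeated concatenation).
import Mathlib
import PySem

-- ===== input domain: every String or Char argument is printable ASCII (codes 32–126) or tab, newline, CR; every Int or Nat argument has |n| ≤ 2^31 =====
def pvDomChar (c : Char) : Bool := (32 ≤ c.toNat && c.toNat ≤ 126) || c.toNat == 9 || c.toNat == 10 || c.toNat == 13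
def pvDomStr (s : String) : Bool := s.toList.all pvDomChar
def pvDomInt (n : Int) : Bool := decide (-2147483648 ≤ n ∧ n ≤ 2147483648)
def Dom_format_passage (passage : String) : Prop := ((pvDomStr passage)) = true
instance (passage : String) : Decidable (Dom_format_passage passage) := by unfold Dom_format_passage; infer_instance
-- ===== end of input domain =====

-- B replaces A's indexed per-character loop (lookback at passage[idx-1]) by a
-- split-on-newline / fix-each-non-final-line / join pipeline (linear join instead of
-- repeated string concatenation; a timing run measured B faster).

-- ===== PORT A =====
-- literal port of A's enumerate loop; passage[idx-1] (in range since idx > 0) is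
-- pyGetD, and the 1-char .endswith(".") test is equality with '.'
def format_passage (passage : String) : String :=
  let l := passage.toList
  String.ofList ((PySem.List.enumerate l).foldl (fun acc (p : Int × Char) =>
    (if p.1 > 0 then
      (if p.2 = '\n' then
        (if PySem.List.pyGetD l (p.1 - 1) ' ' ≠ '\n' ∧ PySem.List.pyGetD l (p.1 - 1) ' ' ≠ '.'
         then acc ++ ['.'] else acc)
       else acc)
     else acc) ++ [p.2]) [])

-- ===== PORT B =====
/-- port of `passage.split('\n')` (single-character separator; exact: Python's
`str.split` with an explicit separator makes no empty-string special cases beyond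
producing `[""]` on the empty string, which this recursion reproduces). -/
def pySplitNl : List Char → List (List Char)
  | [] => [[]]
  | c :: t =>
    if c = '\n' then [] :: pySplitNl t
    else match pySplitNl t with
      | [] => [[c]]   -- unreachable: pySplitNl never returns []
      | p :: ps => (c :: p) :: ps

/-- port of `ln if ln == '' or ln.endswith('.') else ln + '.'`
(for a one-character suffix, `endswith('.')` is `getLast? = some '.'`). -/
def fixLine (ln : List Char) : List Char :=
  if ln = [] ∨ ln.getLast? = some '.' then ln else ln ++ ['.']

/-- port of `'\n'.join(...)` -/
def joinNl : List (List Char) → List Char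
  | [] => []
  | [x] => x
  | x :: xs => x ++ '\n' :: joinNl xs

def format_passage_alt (passage : String) : String :=
  let lines := pySplitNl passage.toList
  let fixed := lines.dropLast.map fixLine            -- lines[:-1], fixed
  String.ofList (joinNl (fixed ++ lines.drop (lines.length - 1)))  -- + lines[-1:]

-- ===== PRECONDITION & SPEC =====
def Spec_format_passage (passage : String) (out : String) : Prop := out = format_passage_alt passage
instance (passage : String) (out : String) : Decidable (Spec_format_passage passage out) := by unfold Spec_format_passage; infer_instance

-- ===== CLAIM =====
def Claim_equal_format_passage : Prop := ∀ (passage : String), Dom_format_passage passage → Spec_format_passage passage (format_passage passage)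

-- ===== LEMMAS AND PROOFS =====

/-- the "emit cur, prefixed by '.' when needed" recursion A's fold reduces to -/
def pvGo (prev : Char) : List Char → List Char
  | [] => []
  | c :: t => (if c = '\n' ∧ prev ≠ '\n' ∧ prev ≠ '.' then ['.', c] else [c]) ++ pvGo c t

/-- B's list-level body -/
def pvB (l : List Char) : List Char :=
  joinNl ((pySplitNl l).dropLast.map fixLine
    ++ (pySplitNl l).drop ((pySplitNl l).length - 1))

lemma pvFold_eq_go (l : List Char) : ∀ (suf : List Char) (j : Nat) (acc : List Char),
    l.drop (j + 1) = suf → j < l.length →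
    (PySem.List.enumerate suf ((j : Int) + 1)).foldl (fun acc (p : Int × Char) =>
      (if p.1 > 0 then
        (if p.2 = '\n' then
          (if PySem.List.pyGetD l (p.1 - 1) ' ' ≠ '\n' ∧ PySem.List.pyGetD l (p.1 - 1) ' ' ≠ '.'
           then acc ++ ['.'] else acc)
         else acc)
       else acc) ++ [p.2]) acc
    = acc ++ pvGo (l.getD j ' ') suf := by
  intro suf
  induction suf with
  | nil => intro j acc _ _; simp [PySem.List.enumerate, pvGo]
  | cons c t ih =>
    intro j acc hdrop hj
    have hcj : l[j + 1]? = some c := by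
      have : (l.drop (j + 1))[0]? = some c := by rw [hdrop]; rfl
      simpa [List.getElem?_drop] using this
    have hj1 : j + 1 < l.length := by
      by_contra hge
      rw [List.getElem?_eq_none (by omega)] at hcj
      simp at hcj
    have hdrop2 : l.drop (j + 2) = t := by
      have := congrArg List.tail hdrop
      simpa [List.tail_drop] using this
    rw [PySem.List.enumerate_cons, List.foldl_cons]
    have hidx : ((j : Int) + 1) + 1 = ((j + 1 : Nat) : Int) + 1 := by push_cast; ring
    rw [hidx, ih (j + 1) _ hdrop2 hj1]
    have hprev : PySem.List.pyGetD l ((j : Int) + 1 - 1) ' ' = l.getD j ' ' := by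
      have : (j : Int) + 1 - 1 = ((j : Nat) : Int) := by ring
      rw [this, PySem.List.pyGetD_natCast]
    have hc : l.getD (j + 1) ' ' = c := by simp [List.getD, hcj]
    have hpos : (0 : Int) < (j : Int) + 1 := by positivity
    rw [hc]
    simp only [gt_iff_lt, hpos, if_pos]
    rw [hprev]
    by_cases h1 : c = '\n' <;> by_cases h2 : l.getD j ' ' ≠ '\n' ∧ l.getD j ' ' ≠ '.'
    · rw [if_pos h1, if_pos h2, pvGo, if_pos ⟨h1, h2⟩]
      simp
    · rw [if_pos h1, if_neg h2, pvGo, if_neg (by tauto)]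
      simp
    · rw [if_neg h1, pvGo, if_neg (by tauto)]
      simp
    · rw [if_neg h1, pvGo, if_neg (by tauto)]
      simp

lemma A_eq_pvGo (passage : String) :
    format_passage passage = String.ofList (pvGo '\n' passage.toList) := by
  unfold format_passage
  cases hl : passage.toList with
  | nil => simp [PySem.List.enumerate, pvGo]
  | cons h t =>
    simp only
    rw [PySem.List.enumerate_cons, List.foldl_cons]
    simp only [gt_iff_lt, lt_self_iff_false, if_false, List.nil_append]
    rw [show (0 : Int) + 1 = ((0 : Nat) : Int) + 1 by norm_num]
    rw [pvFold_eq_go (h :: t) t 0 [h] rfl (by simp)]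
    simp [pvGo]

lemma splitNl_ne_nil (l : List Char) : pySplitNl l ≠ [] := by
  induction l with
  | nil => simp [pySplitNl]
  | cons c t ih =>
    unfold pySplitNl
    split_ifs with h
    · simp
    · cases hs : pySplitNl t with
      | nil => exact absurd hs ih
      | cons p ps => simp

lemma joinNl_cons_cons (x y : List Char) (ys : List (List Char)) :
    joinNl (x :: y :: ys) = x ++ '\n' :: joinNl (y :: ys) := rfl

lemma splitNl_nlfree (u : List Char) (hu : '\n' ∉ u) : pySplitNl u = [u] := by
  induction u with
  | nil => rfl
  | cons c t ih =>
    have hc : c ≠ '\n' := fun h => hu (h ▸ List.mem_cons_self ..)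
    have ht : '\n' ∉ t := fun h => hu (List.mem_cons_of_mem _ h)
    unfold pySplitNl
    rw [if_neg hc, ih ht]

lemma splitNl_append (u v : List Char) (hu : '\n' ∉ u) :
    pySplitNl (u ++ '\n' :: v) = u :: pySplitNl v := by
  induction u with
  | nil => simp [pySplitNl]
  | cons c t ih =>
    have hc : c ≠ '\n' := fun h => hu (h ▸ List.mem_cons_self ..)
    have ht : '\n' ∉ t := fun h => hu (List.mem_cons_of_mem _ h)
    rw [List.cons_append]
    conv_lhs => unfold pySplitNl
    rw [if_neg hc, ih ht]

lemma pvGo_nlfree (prev : Char) (u : List Char) (hu : '\n' ∉ u) : pvGo prev u = u := by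
  induction u generalizing prev with
  | nil => rfl
  | cons c t ih =>
    have hc : c ≠ '\n' := fun h => hu (h ▸ List.mem_cons_self ..)
    have ht : '\n' ∉ t := fun h => hu (List.mem_cons_of_mem _ h)
    rw [pvGo, if_neg (by tauto), ih c ht]
    rfl

lemma pvGo_run (u : List Char) (hu : '\n' ∉ u) : ∀ (prev : Char) (v : List Char),
    pvGo prev (u ++ '\n' :: v) =
      u ++ (if u.getLastD prev ≠ '\n' ∧ u.getLastD prev ≠ '.' then ['.'] else [])
        ++ '\n' :: pvGo '\n' v := by
  induction u with
  | nil =>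
    intro prev v
    rw [List.nil_append, pvGo]
    by_cases h : prev ≠ '\n' ∧ prev ≠ '.'
    · rw [if_pos (by exact ⟨rfl, h⟩)]; simp [List.getLastD, h]
    · rw [if_neg (by tauto)]; simp [List.getLastD]; tauto
  | cons c t ih =>
    intro prev v
    have hc : c ≠ '\n' := fun h => hu (h ▸ List.mem_cons_self ..)
    have ht : '\n' ∉ t := fun h => hu (List.mem_cons_of_mem _ h)
    rw [List.cons_append, pvGo, if_neg (by tauto), ih ht c v]
    have h2 : (c :: t).getLastD prev = t.getLastD c := by cases t <;> rfl
    rw [h2]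
    simp

lemma fixLine_run (prev : Char) (u : List Char) (hu : '\n' ∉ u) (hprev : prev = '\n') :
    u ++ (if u.getLastD prev ≠ '\n' ∧ u.getLastD prev ≠ '.' then ['.'] else []) = fixLine u := by
  cases u with
  | nil => simp [fixLine, List.getLastD, hprev]
  | cons c t =>
    have hlast : (c :: t).getLastD prev = (c :: t).getLast (by simp) := by
      simp [List.getLastD_eq_getLast?, List.getLast?_eq_some_getLast]
    have hmem : (c :: t).getLast (by simp) ∈ c :: t := List.getLast_mem _
    have hnl : (c :: t).getLast (by simp) ≠ '\n' := fun h => hu (h ▸ hmem)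
    rw [hlast]
    unfold fixLine
    by_cases hdot : (c :: t).getLast (by simp) = '.'
    · rw [if_neg (by simp [hdot]), if_pos (by right; simp [List.getLast?_eq_some_getLast, hdot])]
      simp
    · rw [if_pos ⟨hnl, hdot⟩,
        if_neg (by simp [List.getLast?_eq_some_getLast]; exact hdot)]

lemma dropWhile_head_false {p : Char → Bool} : ∀ (l : List Char) {r : Char} {v : List Char},
    l.dropWhile p = r :: v → p r = false := by
  intro l
  induction l with
  | nil => intro r v h; simp [List.dropWhile] at h
  | cons c t ih =>
    intro r v h
    by_cases hc : p c
    · rw [List.dropWhile_cons_of_pos hc] at h; exact ih h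
    · rw [List.dropWhile_cons_of_neg hc] at h
      cases h
      simpa using hc

lemma main_eq : ∀ (n : Nat) (l : List Char), l.length ≤ n → pvGo '\n' l = pvB l := by
  intro n
  induction n with
  | zero =>
    intro l hl
    have : l = [] := List.eq_nil_of_length_eq_zero (Nat.le_zero.mp hl)
    subst this; rfl
  | succ n ih =>
    intro l hl
    rcases hrest : l.dropWhile (· ≠ '\n') with _ | ⟨r, v⟩
    · -- no newline in l
      have hu : '\n' ∉ l := by
        intro hmem
        have := List.dropWhile_eq_nil_iff.mp hrest '\n' hmem
        simp at this
      rw [pvGo_nlfree _ _ hu]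
      unfold pvB
      rw [splitNl_nlfree l hu]
      rfl
    · -- l = u ++ '\n' :: v with u newline-free
      have hr : r = '\n' := by
        have := dropWhile_head_false (p := fun x => decide (x ≠ '\n')) l hrest
        simpa using this
      subst hr
      set u := l.takeWhile (· ≠ '\n') with hu_def
      have hsplit : l = u ++ '\n' :: v := by
        rw [hu_def, ← hrest, List.takeWhile_append_dropWhile]
      have hu : '\n' ∉ u := by
        intro hmem
        have := List.mem_takeWhile_imp hmem
        simp at this
      have hvlen : v.length ≤ n := by
        have : l.length = u.length + (v.length + 1) := by
          rw [hsplit]; simp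
        omega
      rw [hsplit, pvGo_run u hu '\n' v, fixLine_run '\n' u hu rfl, ih v hvlen]
      unfold pvB
      rw [splitNl_append u v hu]
      rcases hps : pySplitNl v with _ | ⟨q, qs⟩
      · exact absurd hps (splitNl_ne_nil v)
      · simp only [List.dropLast_cons_of_ne_nil (by simp : q :: qs ≠ ([] : List (List Char))),
          List.map_cons, List.length_cons]
        have hdrop : (u :: q :: qs).drop (qs.length + 1 + 1 - 1) = (q :: qs).drop (qs.length + 1 - 1) := by
          simp
        rw [hdrop]
        have htail_ne : ((q :: qs).dropLast.map fixLine ++ (q :: qs).drop (qs.length + 1 - 1)) ≠ [] := by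
          simp
        rcases htl : (q :: qs).dropLast.map fixLine ++ (q :: qs).drop (qs.length + 1 - 1) with _ | ⟨y, ys⟩
        · exact absurd htl htail_ne
        · rw [List.cons_append, htl, joinNl_cons_cons]

-- ===== VERDICT =====
theorem format_passage_spec : Claim_equal_format_passage := by
  intro passage _
  unfold Spec_format_passage
  rw [A_eq_pvGo passage, main_eq passage.toList.length passage.toList le_rfl]
  rfl
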